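-- pv_equiv track=rewrite | github.com/mouredev/retos-programacion-2023 | Retos/Reto #9 - HETEROGRAMA, ISOGRAMA Y PANGRAMA [Fácil]/python/Maanghel.py | is_heterogram
-- ===== SOURCE A (Python) =====
-- from typing import Dict, Set
--
-- def is_heterogram(text: str) -> bool:
--     """
--     Check if a given text is a heterogram.
--
--     A heterogram is a word or sentence in which no letter is repeated.
--
--     Args:
--         text (str): The input text to evaluate.
--
--     Returns:
--         bool: True if the text is a heterogram, False otherwise.
--     """
--     _validate(text)
--     text = text.lower()
--     seen_letters: Set[str] = set()
--     for char in text: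
--         if char.isalpha():
--             if char in seen_letters:
--                 return False
--             seen_letters.add(char)
--     return True
--
-- def _validate(data: str) -> None:
--     """
--     Validate the input data to ensure it is a non-empty string.
--
--     Args:
--         data (str): The input to validate.
--
--     Raises:
--         TypeError: If the input is not a string.
--         ValueError: If the string is empty.
--     """
--     if not isinstance(data, str):
--         raise TypeError("Solo se aceptan cadenas de textos.")
--     if not data:
--         raise ValueError("Las cadenas de textos no pueden estar vacias.")
-- ===== SOURCE B (Python) =====
-- def is_heterogram(text: str) -> bool:
--     _validate(text)
--     letters = [c for c in text.lower() if c.isalpha()]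
--     return len(letters) == len(set(letters))
--
-- def _validate(data: str) -> None:
--     if not isinstance(data, str):
--         raise TypeError("Solo se aceptan cadenas de textos.")
--     if not data:
--         raise ValueError("Las cadenas de textos no pueden estar vacias.")
-- ===== Notes on version B (the rewrite author's own statement) =====
-- stated objective: simpler
-- what changed: Replaces the running seen-set loop with per-character membership tests and early return by building the list of letters once and comparing its length to its distinct count.
import Mathlib
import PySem

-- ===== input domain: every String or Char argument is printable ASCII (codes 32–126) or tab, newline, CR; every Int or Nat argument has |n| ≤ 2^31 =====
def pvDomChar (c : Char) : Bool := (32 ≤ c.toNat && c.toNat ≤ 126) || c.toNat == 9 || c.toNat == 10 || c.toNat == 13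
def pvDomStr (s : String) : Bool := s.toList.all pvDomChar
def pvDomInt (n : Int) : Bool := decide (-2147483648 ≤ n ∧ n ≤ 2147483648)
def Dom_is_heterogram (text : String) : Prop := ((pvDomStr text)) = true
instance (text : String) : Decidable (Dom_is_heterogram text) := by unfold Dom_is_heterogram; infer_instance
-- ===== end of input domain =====

-- B builds the list of letters once and compares total count with distinct count,
-- instead of A's running seen-set with per-character membership tests and early return (objective: simpler).

-- ===== PORT A =====
-- the 'for char in text' loop with the running seen_letters set and early 'return False'
def pvHeteroLoop : List Char → PySem.Set Char → Bool
  | [], _ => true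
  | c :: rest, seen =>
    if PySem.Chars.isalpha c then
      if seen.contains c then false
      else pvHeteroLoop rest (seen.add c)
    else pvHeteroLoop rest seen

def is_heterogram (text : String) : Bool :=
  pvHeteroLoop (PySem.Chars.lower text.toList) PySem.Set.empty

-- ===== PORT B =====
def is_heterogram_alt (text : String) : Bool :=
  let letters := (PySem.Chars.lower text.toList).filter PySem.Chars.isalpha
  ((letters.length : Int) == PySem.Set.len (PySem.Set.ofList letters))

-- ===== PRECONDITION & SPEC =====
-- Pre_ excludes only the empty string, on which A's _validate raises ValueError.
def Pre_is_heterogram (text : String) : Prop := text ≠ ""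
instance (text : String) : Decidable (Pre_is_heterogram text) := by unfold Pre_is_heterogram; infer_instance
def pvWitness_is_heterogram : String := "Murcielago!"
def Spec_is_heterogram (text : String) (out : Bool) : Prop := out = is_heterogram_alt text
instance (text : String) (out : Bool) : Decidable (Spec_is_heterogram text out) := by unfold Spec_is_heterogram; infer_instance

-- ===== CLAIM (what is proved, stated in full; the proofs are below) =====
def Claim_equal_is_heterogram : Prop := ∀ (text : String), Dom_is_heterogram text → Pre_is_heterogram text → Spec_is_heterogram text (is_heterogram text)

-- ===== LEMMAS AND PROOFS =====

-- A's loop answers: is seen ++ (letters of l) duplicate-free?  (seen is duplicate-free throughout)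
lemma pvHeteroLoop_eq (l : List Char) : ∀ (seen : PySem.Set Char), seen.Nodup →
    pvHeteroLoop l seen = decide ((seen ++ l.filter PySem.Chars.isalpha).Nodup) := by
  induction l with
  | nil => intro seen h; simp [pvHeteroLoop, h]
  | cons c rest ih =>
    intro seen h
    by_cases ha : PySem.Chars.isalpha c
    · by_cases hc : c ∈ seen
      · have hnd2 : ¬ (seen ++ c :: rest.filter PySem.Chars.isalpha).Nodup := by
          rw [List.nodup_append]
          rintro ⟨-, -, hd⟩
          exact hd c hc c (by simp) rfl
        simp [pvHeteroLoop, ha, PySem.Set.contains, hc, hnd2]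
      · have hadd : seen.add c = seen ++ [c] := PySem.Set.add_of_not_mem hc
        have hnd2 : (seen ++ [c]).Nodup := by
          simp [List.nodup_append, h]
          exact fun a hm he => hc (he ▸ hm)
        simp only [pvHeteroLoop, ha, if_true]
        rw [if_neg (by simp [PySem.Set.contains, hc]), hadd, ih _ hnd2, List.append_assoc,
          List.singleton_append, List.filter_cons_of_pos ha]
    · simp only [pvHeteroLoop, ha, if_false, Bool.false_eq_true, ih seen h, List.filter_cons]

-- distinct count = total count exactly when the list is duplicate-free
lemma pvLenOfList_lt (l : List Char) (h : ¬ l.Nodup) :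
    (PySem.Set.ofList l).length < l.length := by
  induction l with
  | nil => simp at h
  | cons c rest ih =>
    rw [PySem.Set.ofList_cons]
    by_cases hc : c ∈ rest
    · have hm : c ∈ PySem.Set.ofList rest := (PySem.Set.mem_ofList rest c).mpr hc
      have : ((PySem.Set.ofList rest).discard c).length < (PySem.Set.ofList rest).length := by
        simp [PySem.Set.discard]
        exact hc
      have h2 := PySem.Set.length_ofList_le rest
      simp only [List.length_cons]
      omega
    · have hrest : ¬ rest.Nodup := by
        intro hnd; exact h (List.nodup_cons.mpr ⟨hc, hnd⟩)
      have h1 := ih hrest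
      have : ((PySem.Set.ofList rest).discard c).length ≤ (PySem.Set.ofList rest).length := by
        simp [PySem.Set.discard]
        exact List.length_filter_le _ _
      simp only [List.length_cons]
      omega

lemma pvCount_eq_iff (l : List Char) :
    (((l.length : Int) == PySem.Set.len (PySem.Set.ofList l))) = decide l.Nodup := by
  by_cases h : l.Nodup
  · simp [PySem.Set.ofList_eq_self_of_nodup l h, PySem.Set.len, h]
  · have := pvLenOfList_lt l h
    simp only [PySem.Set.len, h, decide_false, beq_eq_false_iff_ne, ne_eq]
    intro heq
    omega

-- ===== VERDICT (by name: the statement is the Claim_ definition above) =====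
theorem is_heterogram_spec : Claim_equal_is_heterogram := by
  intro text _ _
  unfold Spec_is_heterogram is_heterogram is_heterogram_alt
  rw [pvHeteroLoop_eq _ PySem.Set.empty (by simp [PySem.Set.empty]), pvCount_eq_iff]
  simp [PySem.Set.empty]
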